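-- pv_equiv track=rewrite | github.com/tkdgns8234/DataStructure-Algorithm | Algorithm/프로그래머스/2018_KAKAO_BLIND_REC/lv2_방금그곡.py | get_melody
-- ===== SOURCE A (Python) =====
-- def get_melody(melody, time):
--     rs = []
--     now = 0
--     while time >= 0:
--         time -= 1
--
--         if now == len(melody):
--             now = 0
--
--         if now + 1 < len(melody) and melody[now + 1] == '#':
--             rs.append(melody[now]+'#')
--             now += 2
--         else:
--             rs.append(melody[now])
--             now += 1
--
--     return "".join(rs)
-- ===== SOURCE B (Python) =====
-- def get_melody(melody, time):
--     # pass 1: parse melody into whole notes (a letter plus an optional '#')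
--     notes = []
--     i = 0
--     n = len(melody)
--     while i < n:
--         if i + 1 < n and melody[i + 1] == '#':
--             notes.append(melody[i] + '#')
--             i += 2
--         else:
--             notes.append(melody[i])
--             i += 1
--     # pass 2: emit time+1 notes cyclically
--     out = []
--     idx = 0
--     for _ in range(time + 1):
--         if idx == len(notes):
--             idx = 0
--         out.append(notes[idx])
--         idx += 1
--     return "".join(out)
-- ===== Notes on version B (the rewrite author's own statement) =====
-- stated objective: alternative
-- what changed: A parses and emits in one interleaved loop over character positions; B first parses the melody once into a list of whole notes, then a second pass emits time+1 notes cyclically by index.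
import Mathlib
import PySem

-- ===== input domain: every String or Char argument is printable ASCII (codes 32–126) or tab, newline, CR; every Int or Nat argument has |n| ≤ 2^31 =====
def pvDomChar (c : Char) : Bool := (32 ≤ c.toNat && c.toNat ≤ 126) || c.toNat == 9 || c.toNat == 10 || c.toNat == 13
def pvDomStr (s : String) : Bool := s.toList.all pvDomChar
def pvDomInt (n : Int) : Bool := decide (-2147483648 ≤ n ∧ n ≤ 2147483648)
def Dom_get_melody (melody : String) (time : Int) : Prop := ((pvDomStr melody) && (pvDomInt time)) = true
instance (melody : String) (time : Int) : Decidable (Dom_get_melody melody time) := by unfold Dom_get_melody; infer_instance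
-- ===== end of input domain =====

-- B parses the melody into whole notes first, then emits time+1 notes cyclically,
-- instead of A's single interleaved parse-and-emit loop over character positions.

-- ===== PORT A =====
-- A's while loop: one appended note per iteration, `now` is a character index that
-- resets to 0 when it reaches len(melody). melody[now] on an empty melody raises in
-- Python (excluded by Pre_); here getD returns a default character.
def loopA (melody : List Char) (time : Int) (now : Nat) (rs : List String) : List String :=
  if _h : 0 ≤ time then
    let time' := time - 1
    let now1 := if now = melody.length then 0 else now
    if now1 + 1 < melody.length ∧ melody.getD (now1 + 1) ' ' = '#' then
      loopA melody time' (now1 + 2) (rs ++ [String.ofList [melody.getD now1 ' ', '#']])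
    else
      loopA melody time' (now1 + 1) (rs ++ [String.ofList [melody.getD now1 ' ']])
  else rs
termination_by (time + 1).toNat
decreasing_by all_goals omega

def get_melody (melody : String) (time : Int) : String :=
  String.join (loopA melody.toList time 0 [])

-- ===== PORT B =====
-- pass 1 of Source B: the parsing while-loop, as structural recursion on the characters
def parseNotesB : List Char → List String
  | [] => []
  | [c] => [String.ofList [c]]
  | c :: d :: rest =>
    if d = '#' then String.ofList [c, '#'] :: parseNotesB rest
    else String.ofList [c] :: parseNotesB (d :: rest)

-- pass 2 of Source B: emit `count` notes cyclically, resetting the index at the length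
def emitB (notes : List String) : Nat → Nat → List String → List String
  | 0, _, out => out
  | n + 1, idx, out =>
    let idx1 := if idx = notes.length then 0 else idx
    emitB notes n (idx1 + 1) (out ++ [notes.getD idx1 ""])

def get_melody_alt (melody : String) (time : Int) : String :=
  String.join (emitB (parseNotesB melody.toList) (time + 1).toNat 0 [])

-- ===== PRECONDITION & SPEC =====
-- Pre_ excludes exactly the inputs where A raises IndexError (empty melody with
-- time ≥ 0); B raises there too.
def Pre_get_melody (melody : String) (time : Int) : Prop := melody ≠ "" ∨ time < 0
instance (melody : String) (time : Int) : Decidable (Pre_get_melody melody time) := by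
  unfold Pre_get_melody; infer_instance
def pvWitness_get_melody : String × Int := ("CC#BCC#BCC#BCC#B", 10)

def Spec_get_melody (melody : String) (time : Int) (out : String) : Prop := out = get_melody_alt melody time
instance (melody : String) (time : Int) (out : String) : Decidable (Spec_get_melody melody time out) := by unfold Spec_get_melody; infer_instance

-- ===== CLAIM (what is proved, stated in full; the proofs are below) =====
def Claim_equal_get_melody : Prop := ∀ (melody : String) (time : Int), Dom_get_melody melody time → Pre_get_melody melody time → Spec_get_melody melody time (get_melody melody time)

-- ===== LEMMAS AND PROOFS =====

def offB (m : List Char) (idx : Nat) : Nat :=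
  ((((parseNotesB m).take idx).map String.toList).map List.length).sum

theorem flat_parse (cs : List Char) : ((parseNotesB cs).map String.toList).flatten = cs := by
  induction cs using parseNotesB.induct <;> simp_all [parseNotesB]

theorem drop_flatten (ns : List (List Char)) (k : Nat) :
    ns.flatten.drop (((ns.take k).map List.length).sum) = (ns.drop k).flatten := by
  induction ns generalizing k with
  | nil => simp
  | cons l ls ih =>
    cases k with
    | zero => simp
    | succ k =>
      simpa [List.drop_append, List.drop_of_length_le, Nat.add_sub_cancel_left] using ih k

theorem note_shape (cs : List Char) (k : Nat) (h : k < (parseNotesB cs).length) :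
    (∃ c, ((parseNotesB cs)[k]).toList = [c] ∧
      ¬ ((((parseNotesB cs).drop (k+1)).map String.toList).flatten.head? = some '#'))
    ∨ (∃ c, ((parseNotesB cs)[k]).toList = [c, '#']) := by
  induction cs using parseNotesB.induct generalizing k with
  | case1 => simp [parseNotesB] at h
  | case2 c =>
    left
    have hk : k = 0 := by simp [parseNotesB] at h; omega
    subst hk
    simp [parseNotesB]
  | case3 c rest ih =>
    cases k with
    | zero =>
      right
      exact ⟨c, by simp [parseNotesB]⟩
    | succ k =>
      have h' : k < (parseNotesB rest).length := by simp [parseNotesB] at h; omega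
      simpa [parseNotesB] using ih k h'
  | case4 c d rest hd ih =>
    cases k with
    | zero =>
      left
      refine ⟨c, by simp [parseNotesB, hd], ?_⟩
      have h2 : (((parseNotesB (d :: rest)).map String.toList).flatten) = d :: rest := flat_parse _
      simp [parseNotesB, hd, h2]
    | succ k =>
      have h' : k < (parseNotesB (d :: rest)).length := by simp [parseNotesB, hd] at h; omega
      simpa [parseNotesB, hd] using ih k h'

theorem parse_ne_nil (m : List Char) (hm : m ≠ []) : parseNotesB m ≠ [] := by
  cases m with
  | nil => exact absurd rfl hm
  | cons c cs =>
    cases cs with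
    | nil => simp [parseNotesB]
    | cons d rest => simp only [parseNotesB]; split <;> simp

theorem suffix_eq (m : List Char) (idx : Nat) :
    m.drop (offB m idx) = (((parseNotesB m).drop idx).map String.toList).flatten := by
  have h := drop_flatten ((parseNotesB m).map String.toList) idx
  rw [flat_parse] at h
  simpa [offB, List.map_take, List.map_drop, List.map_map] using h

theorem offB_total (m : List Char) : offB m (parseNotesB m).length = m.length := by
  conv_rhs => rw [← flat_parse m]
  simp [offB, List.length_flatten]

theorem offB_succ (m : List Char) (idx : Nat) (h : idx < (parseNotesB m).length) :
    offB m (idx + 1) = offB m idx + ((parseNotesB m)[idx]).toList.length := by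
  unfold offB
  rw [← List.take_concat_get h, List.concat_eq_append, List.map_append, List.map_append,
    List.sum_append]
  simp

theorem offB_lt (m : List Char) (idx : Nat) (h : idx < (parseNotesB m).length) :
    offB m idx < m.length := by
  have hs := suffix_eq m idx
  have hd : (parseNotesB m).drop idx = (parseNotesB m)[idx] :: (parseNotesB m).drop (idx + 1) :=
    List.drop_eq_getElem_cons h
  have h1 : 1 ≤ (m.drop (offB m idx)).length := by
    rw [hs, hd, List.map_cons, List.flatten_cons, List.length_append]
    rcases note_shape m idx h with ⟨c, hc, _⟩ | ⟨c, hc⟩ <;> rw [hc] <;> simp <;> omega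
  simp only [List.length_drop] at h1
  omega

theorem loop_eq (m : List Char) (hm : m ≠ []) (t : Int) (idx : Nat)
    (hidx : idx ≤ (parseNotesB m).length) (rs : List String) :
    loopA m t (offB m idx) rs = emitB (parseNotesB m) (t + 1).toNat idx rs := by
  generalize hn : (t + 1).toNat = n
  induction n generalizing t idx rs with
  | zero =>
    have ht : ¬ 0 ≤ t := by omega
    rw [loopA]
    simp [ht, emitB]
  | succ n ih =>
    have ht : 0 ≤ t := by omega
    have hnn : parseNotesB m ≠ [] := parse_ne_nil m hm
    -- the reset index on B's side
    set j := if idx = (parseNotesB m).length then 0 else idx with hj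
    have hjlt : j < (parseNotesB m).length := by
      rw [hj]; split
      · exact List.length_pos_of_ne_nil hnn
      · omega
    have hreset : (if offB m idx = m.length then 0 else offB m idx) = offB m j := by
      by_cases hfull : idx = (parseNotesB m).length
      · have h1 : offB m idx = m.length := by rw [hfull]; exact offB_total m
        rw [if_pos h1, hj, if_pos hfull]
        rfl
      · have h2 := offB_lt m idx (lt_of_le_of_ne hidx hfull)
        rw [if_neg (by omega), hj, if_neg hfull]
    have hnowlt : offB m j < m.length := offB_lt m j hjlt
    have hsfx : m.drop (offB m j) =
        ((parseNotesB m)[j]).toList ++ (((parseNotesB m).drop (j+1)).map String.toList).flatten := by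
      rw [suffix_eq m j, List.drop_eq_getElem_cons hjlt, List.map_cons, List.flatten_cons]
    have hmdrop : m.drop (offB m j) = m[offB m j] :: m.drop (offB m j + 1) :=
      List.drop_eq_getElem_cons hnowlt
    have hgetD : m.getD (offB m j) ' ' = m[offB m j] := List.getD_eq_getElem m ' ' hnowlt
    have hBapp : (parseNotesB m).getD j "" = (parseNotesB m)[j] := List.getD_eq_getElem _ "" hjlt
    rw [loopA, emitB]
    simp only [ht, dif_pos, hreset, ← hj, hBapp]
    rcases note_shape m j hjlt with ⟨c, hc, hnohash⟩ | ⟨c, hc⟩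
    · -- one-char note
      rw [hc, List.singleton_append] at hsfx
      have hcons := hmdrop.symm.trans hsfx
      injection hcons with h4 h5
      have hcond : ¬ (offB m j + 1 < m.length ∧ m.getD (offB m j + 1) ' ' = '#') := by
        rintro ⟨hlt, heq⟩
        rw [List.getD_eq_getElem m ' ' hlt] at heq
        have h2 : m.drop (offB m j + 1) = m[offB m j + 1] :: m.drop (offB m j + 2) :=
          List.drop_eq_getElem_cons hlt
        apply hnohash
        rw [← h5, h2, heq]
        simp
      rw [if_neg hcond]
      have happ : String.ofList [m.getD (offB m j) ' '] = (parseNotesB m)[j] := by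
        rw [hgetD, h4, ← hc, String.ofList_toList]
      have hoff : offB m j + 1 = offB m (j + 1) := by
        rw [offB_succ m j hjlt, hc]
        rfl
      rw [happ, hoff]
      exact ih (t - 1) (j + 1) (by omega) (rs ++ [(parseNotesB m)[j]]) (by omega)
    · -- two-char note
      rw [hc, show ([c, '#'] : List Char) ++ (((parseNotesB m).drop (j+1)).map String.toList).flatten
            = c :: '#' :: (((parseNotesB m).drop (j+1)).map String.toList).flatten from rfl] at hsfx
      have hcons := hmdrop.symm.trans hsfx
      injection hcons with h4 h5
      have hlt2 : offB m j + 1 < m.length := by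
        by_contra hge
        have h6 : m.drop (offB m j + 1) = [] := List.drop_eq_nil_of_le (by omega)
        rw [h5] at h6; exact List.cons_ne_nil _ _ h6
      have hhash : m[offB m j + 1] = '#' := by
        have h2 : m.drop (offB m j + 1) = m[offB m j + 1] :: m.drop (offB m j + 2) :=
          List.drop_eq_getElem_cons hlt2
        have h7 := h2.symm.trans h5
        injection h7
      have hcond : offB m j + 1 < m.length ∧ m.getD (offB m j + 1) ' ' = '#' :=
        ⟨hlt2, by rw [List.getD_eq_getElem m ' ' hlt2]; exact hhash⟩
      rw [if_pos hcond]
      have happ : String.ofList [m.getD (offB m j) ' ', '#'] = (parseNotesB m)[j] := by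
        rw [hgetD, h4, ← String.ofList_toList (s := (parseNotesB m)[j]), hc]
      have hoff : offB m j + 2 = offB m (j + 1) := by
        rw [offB_succ m j hjlt, hc]; rfl
      rw [happ, hoff]
      exact ih (t - 1) (j + 1) (by omega) (rs ++ [(parseNotesB m)[j]]) (by omega)

-- ===== VERDICT (by name: the statement is the Claim_ definition above) =====
theorem get_melody_spec : Claim_equal_get_melody := by
  intro melody time _ hpre
  unfold Spec_get_melody get_melody get_melody_alt
  rcases hpre with h | h
  · have hm : melody.toList ≠ [] := by
      simpa [String.toList_eq_nil_iff] using h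
    have h2 : offB melody.toList 0 = 0 := rfl
    have := loop_eq melody.toList hm time 0 (Nat.zero_le _) []
    rw [h2] at this
    exact congrArg String.join this
  · have h0 : (time + 1).toNat = 0 := by omega
    rw [loopA, emitB.eq_def]
    simp [h0, not_le.mpr (by omega : time < 0)]
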